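-- pv_equiv track=rewrite | github.com/SonghanHu/QuantAgent | scripts/agent/equity_viz.py | _is_placeholder_date_series
-- ===== SOURCE A (Python) =====
-- def _is_placeholder_date_series(dates: list[str]) -> bool:
--     """Reject obviously bogus date labels such as repeated Unix epoch placeholders."""
--     cleaned = [str(d)[:10] for d in dates if str(d).strip()]
--     if not cleaned:
--         return True
--     unique = set(cleaned)
--     if len(unique) == 1 and next(iter(unique)) == "1970-01-01":
--         return True
--     if len(unique) == 1 and len(cleaned) > 3:
--         return True
--     return False
-- ===== SOURCE B (Python) =====
-- def _is_placeholder_date_series(dates: list[str]) -> bool: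
--     """Staged early-exit check: locate the first non-blank label, bail out False as
--     soon as a different truncated label appears, and only count labels when the
--     epoch shortcut does not apply."""
--     # Stage 1: find the first kept (non-blank) truncated label.
--     i = 0
--     first = None
--     while i < len(dates):
--         s = str(dates[i])
--         if s.strip():
--             first = s[:10]
--             break
--         i += 1
--     if first is None:
--         return True  # nothing kept at all
--     # Stage 2: early exit on the first mismatching kept label.
--     for d in dates[i + 1:]:
--         s = str(d)
--         if s.strip() and s[:10] != first:
--             return False
--     # Stage 3: all kept labels agree with `first`.
--     if first == "1970-01-01":
--         return True
--     return sum(1 for d in dates if str(d).strip()) > 3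
-- ===== Notes on version B (the rewrite author's own statement) =====
-- stated objective: alternative
-- what changed: Replaces A's build-everything pipeline (materialise the cleaned list, then its uniqueness set) with a staged early-exit scan: find the first non-blank truncated label, return False on the first mismatching later label without looking further, and count non-blank labels only in the residual non-epoch branch.
import Mathlib
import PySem

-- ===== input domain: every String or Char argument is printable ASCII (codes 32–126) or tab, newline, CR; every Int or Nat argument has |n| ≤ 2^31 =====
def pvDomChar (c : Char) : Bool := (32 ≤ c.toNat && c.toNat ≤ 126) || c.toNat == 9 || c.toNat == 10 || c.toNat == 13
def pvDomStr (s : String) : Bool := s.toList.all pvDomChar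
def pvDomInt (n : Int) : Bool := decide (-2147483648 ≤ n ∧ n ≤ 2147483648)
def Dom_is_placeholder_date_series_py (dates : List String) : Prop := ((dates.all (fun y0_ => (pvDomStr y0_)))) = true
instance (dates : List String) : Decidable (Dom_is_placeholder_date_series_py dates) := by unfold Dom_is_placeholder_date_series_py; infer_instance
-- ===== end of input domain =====

-- B replaces A's build-then-inspect pipeline (cleaned list + uniqueness set) with a staged
-- early-exit scan (find first kept label, bail out on first mismatch, count only if needed).

-- ===== PORT A =====
def is_placeholder_date_series_py (dates : List String) : Bool :=
  -- cleaned = [str(d)[:10] for d in dates if str(d).strip()]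
  let cleaned := (dates.filter (fun d => !(PySem.Str.strip d == ""))).map
      (fun d => PySem.Str.slice d none (some 10))
  if cleaned.isEmpty then true
  else
    let unique := PySem.Set.ofList cleaned
    if unique.length == 1 && (unique.headD "" == "1970-01-01") then true
    else if unique.length == 1 && cleaned.length > 3 then true
    else false

-- ===== PORT B =====
-- Stage 1 of Source B: the while-loop that finds the first non-blank label; returns its
-- truncation together with the remainder of the list (the Python `dates[i+1:]`).
def pvFindFirst : List String → Option (String × List String)
  | [] => none
  | d :: ds =>
      if PySem.Str.strip d == "" then pvFindFirst ds
      else some (PySem.Str.slice d none (some 10), ds)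

def is_placeholder_date_series_py_alt (dates : List String) : Bool :=
  match pvFindFirst dates with
  | none => true
  | some (first, rest) =>
      -- Stage 2: early exit on the first mismatching kept label
      if rest.any (fun d => !(PySem.Str.strip d == "")
                      && !(PySem.Str.slice d none (some 10) == first)) then false
      -- Stage 3
      else if first == "1970-01-01" then true
      else decide ((dates.countP (fun d => !(PySem.Str.strip d == ""))) > 3)

-- ===== PRECONDITION & SPEC =====
def Spec_is_placeholder_date_series_py (dates : List String) (out : Bool) : Prop := out = is_placeholder_date_series_py_alt dates
instance (dates : List String) (out : Bool) : Decidable (Spec_is_placeholder_date_series_py dates out) := by unfold Spec_is_placeholder_date_series_py; infer_instance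

-- ===== CLAIM (what is proved, stated in full; the proofs are below) =====
def Claim_equal_is_placeholder_date_series_py : Prop := ∀ (dates : List String), Dom_is_placeholder_date_series_py dates → Spec_is_placeholder_date_series_py dates (is_placeholder_date_series_py dates)

-- ===== LEMMAS AND PROOFS =====

-- A's cleaned list
def pvCleaned (dates : List String) : List String :=
  (dates.filter (fun d => !(PySem.Str.strip d == ""))).map (fun d => PySem.Str.slice d none (some 10))

lemma ff_none (dates : List String) (h : pvFindFirst dates = none) : pvCleaned dates = [] := by
  induction dates with
  | nil => rfl
  | cons d ds ih =>
      by_cases hd : (PySem.Str.strip d == "") = true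
      · simp only [pvFindFirst, hd, if_pos] at h
        simpa [pvCleaned, hd] using ih h
      · simp [pvFindFirst, hd] at h

lemma ff_some (dates : List String) (f : String) (rest : List String)
    (h : pvFindFirst dates = some (f, rest)) :
    pvCleaned dates = f :: pvCleaned rest := by
  induction dates with
  | nil => simp [pvFindFirst] at h
  | cons d ds ih =>
      by_cases hd : (PySem.Str.strip d == "") = true
      · simp only [pvFindFirst, hd, if_pos] at h
        simpa [pvCleaned, hd] using ih h
      · simp only [pvFindFirst, hd, if_neg, Bool.not_eq_true] at h
        obtain ⟨h1, h2⟩ := Prod.mk.injEq .. ▸ Option.some_inj.mp h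
        subst h1; subst h2
        simp [pvCleaned, hd]

lemma any_mismatch (rest : List String) (f : String) :
    rest.any (fun d => !(PySem.Str.strip d == "")
                  && !(PySem.Str.slice d none (some 10) == f))
      = !((pvCleaned rest).all (· == f)) := by
  induction rest with
  | nil => rfl
  | cons d ds ih =>
      by_cases hd : (PySem.Str.strip d == "") = true
      · simp only [List.any_cons, hd, Bool.not_true, Bool.false_and, Bool.false_or]
        simpa [pvCleaned, hd] using ih
      · have hd' : (PySem.Str.strip d == "") = false := by simpa using hd
        simp only [List.any_cons, hd', Bool.not_false, Bool.true_and]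
        rw [ih, show pvCleaned (d :: ds)
              = PySem.Str.slice d none (some 10) :: pvCleaned ds from by simp [pvCleaned, hd']]
        cases h1 : (PySem.Str.slice d none (some 10) == f) <;>
          cases h2 : (pvCleaned ds).all (· == f) <;> simp [h1, h2]

lemma count_eq (dates : List String) :
    dates.countP (fun d => !(PySem.Str.strip d == "")) = (pvCleaned dates).length := by
  simp [pvCleaned, List.countP_eq_length_filter]

lemma ofList_all_eq (c : String) (cs : List String) (h : cs.all (· == c) = true) :
    PySem.Set.ofList (c :: cs) = [c] := by
  induction cs with
  | nil => rfl
  | cons x xs ih =>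
      simp only [List.all_cons, Bool.and_eq_true, beq_iff_eq] at h
      obtain ⟨h1, h2⟩ := h
      subst h1
      have he : PySem.Set.ofList (x :: x :: xs) = PySem.Set.ofList (x :: xs) := by
        simp [PySem.Set.ofList_eq_foldl, PySem.Set.add, PySem.Set.contains]
      rw [he]
      exact ih (by simpa using h2)

lemma ofList_len_ne_one (c : String) (cs : List String) (h : cs.all (· == c) = false) :
    (PySem.Set.ofList (c :: cs)).length ≠ 1 := by
  obtain ⟨x, hx, hne⟩ : ∃ x ∈ cs, ¬ (x == c) = true := by
    simpa [List.all_eq_false] using h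
  have hxne : x ≠ c := by simpa using hne
  have hcm : c ∈ PySem.Set.ofList (c :: cs) := by
    rw [PySem.Set.mem_ofList]; exact List.mem_cons_self ..
  have hxm : x ∈ PySem.Set.ofList (c :: cs) := by
    rw [PySem.Set.mem_ofList]; exact List.mem_cons_of_mem _ hx
  intro hlen
  obtain ⟨y, hy⟩ := List.length_eq_one_iff.mp hlen
  rw [hy] at hcm hxm
  simp only [List.mem_singleton] at hcm hxm
  exact hxne (hxm.trans hcm.symm)

-- ===== VERDICT (by name: the statement is the Claim_ definition above) =====
theorem is_placeholder_date_series_py_spec : Claim_equal_is_placeholder_date_series_py := by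
  intro dates _
  show is_placeholder_date_series_py dates = is_placeholder_date_series_py_alt dates
  have hA : is_placeholder_date_series_py dates =
      (if (pvCleaned dates).isEmpty then true
       else if ((PySem.Set.ofList (pvCleaned dates)).length == 1 &&
                ((PySem.Set.ofList (pvCleaned dates)).headD "" == "1970-01-01")) then true
       else if ((PySem.Set.ofList (pvCleaned dates)).length == 1 &&
                decide ((pvCleaned dates).length > 3)) then true
       else false) := rfl
  cases hff : pvFindFirst dates with
  | none =>
      rw [hA, ff_none dates hff]
      simp [is_placeholder_date_series_py_alt, hff]
  | some p =>
      obtain ⟨f, rest⟩ := p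
      have hcl := ff_some dates f rest hff
      rw [hA, hcl]
      have hB : is_placeholder_date_series_py_alt dates =
          (if !((pvCleaned rest).all (· == f)) then false
           else if f == "1970-01-01" then true
           else decide ((pvCleaned dates).length > 3)) := by
        simp [is_placeholder_date_series_py_alt, hff, any_mismatch, count_eq]
      rw [hB, hcl]
      by_cases hall : (pvCleaned rest).all (· == f) = true
      · rw [ofList_all_eq f _ hall]
        by_cases hep : (f == "1970-01-01") = true
        · simp [hall, hep]
        · have hep' : (f == "1970-01-01") = false := by simpa using hep
          simp [hall, hep']
      · have hall' : (pvCleaned rest).all (· == f) = false := by simpa using hall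
        have hb : ((PySem.Set.ofList (f :: pvCleaned rest)).length == 1) = false := by
          rw [beq_eq_false_iff_ne]; exact ofList_len_ne_one f _ hall'
        simp [hall', hb]
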